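-- pv_equiv track=rewrite | github.com/nishanth-s-dev/problem-solving | algoexpert/array/medium/best-seat.py | bestSeat
-- ===== SOURCE A (Python) =====
-- def bestSeat(seats):
--     res = -1
--     maxSpace = 0
--
--     left = 0
--     while left < len(seats):
--         right = left + 1
--         while right < len(seats) and seats[right] == 0:
--             right += 1
--         availableSpace = right - left - 1
--         if availableSpace > maxSpace:
--             res = (right + left) // 2
--             maxSpace = availableSpace
--         left = right
--     return res
-- ===== SOURCE B (Python) =====
-- def bestSeat(seats):
--     n = len(seats)
--     bounds = [0] + [i for i in range(1, n) if seats[i] != 0] + [n]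
--     res = -1
--     maxSpace = 0
--     for a, b in zip(bounds, bounds[1:]):
--         space = b - a - 1
--         if space > maxSpace:
--             res = (a + b) // 2
--             maxSpace = space
--     return res
-- ===== Notes on version B (the rewrite author's own statement) =====
-- stated objective: simpler
-- what changed: Replaces A's nested two-pointer while-scan with building the boundary-index list once ([0] + indices of occupied seats + [n]) and a single flat scan over its consecutive pairs.
import Mathlib
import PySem

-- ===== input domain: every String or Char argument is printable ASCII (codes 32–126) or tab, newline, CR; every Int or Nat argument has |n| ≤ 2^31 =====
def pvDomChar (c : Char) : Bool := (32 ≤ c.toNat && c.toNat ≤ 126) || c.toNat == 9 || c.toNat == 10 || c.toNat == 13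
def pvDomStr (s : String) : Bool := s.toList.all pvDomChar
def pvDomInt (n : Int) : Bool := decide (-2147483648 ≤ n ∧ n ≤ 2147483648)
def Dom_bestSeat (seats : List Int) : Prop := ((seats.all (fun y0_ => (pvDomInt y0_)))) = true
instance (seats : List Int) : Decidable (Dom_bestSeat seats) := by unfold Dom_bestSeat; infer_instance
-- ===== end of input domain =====

-- B replaces A's nested two-pointer while-scan by building the boundary-index list once and
-- scanning its consecutive pairs (objective: simpler single-pass decomposition; same O(n) cost).

-- ===== PORT A =====
-- inner while: advance right while right < len(seats) and seats[right] == 0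
def bestSeatSkip (seats : List Int) (right : Nat) : Nat :=
  if h : right < seats.length then
    if seats.getD right 0 = 0 then bestSeatSkip seats (right + 1) else right
  else right
termination_by seats.length - right

theorem bestSeatSkip_ge (seats : List Int) (right : Nat) : right ≤ bestSeatSkip seats right := by
  unfold bestSeatSkip
  split

  · split
    · exact le_trans (Nat.le_succ _) (bestSeatSkip_ge seats (right + 1))
    · exact le_refl _
  · exact le_refl _
termination_by seats.length - right

-- outer while over left with state (res, maxSpace)
def bestSeatLoop (seats : List Int) (left : Nat) (res maxSpace : Int) : Int :=
  if _h : left < seats.length then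
    let right := bestSeatSkip seats (left + 1)
    let availableSpace : Int := (right : Int) - left - 1
    if availableSpace > maxSpace then
      bestSeatLoop seats right (PySem.Int.floordiv ((right : Int) + left) 2) availableSpace
    else
      bestSeatLoop seats right res maxSpace
  else res
termination_by seats.length - left
decreasing_by
  all_goals
    have := bestSeatSkip_ge seats (left + 1)
    omega

def bestSeat (seats : List Int) : Int := bestSeatLoop seats 0 (-1) 0

-- ===== PORT B =====
-- step of the for-loop over consecutive boundary pairs
def bestSeatStep (st : Int × Int) (p : Nat × Nat) : Int × Int :=
  let space : Int := (p.2 : Int) - p.1 - 1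
  if space > st.2 then (PySem.Int.floordiv ((p.1 : Int) + p.2) 2, space) else st

def bestSeat_alt (seats : List Int) : Int :=
  let n := seats.length
  let bounds : List Nat :=
    0 :: ((List.range' 1 (n - 1)).filter (fun i => seats.getD i 0 ≠ 0) ++ [n])
  (List.foldl bestSeatStep (-1, 0) (bounds.zip bounds.tail)).1

-- ===== PRECONDITION & SPEC =====
def Spec_bestSeat (seats : List Int) (out : Int) : Prop := out = bestSeat_alt seats
instance (seats : List Int) (out : Int) : Decidable (Spec_bestSeat seats out) := by unfold Spec_bestSeat; infer_instance

-- ===== CLAIM (what is proved, stated in full; the proofs are below) =====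
def Claim_equal_bestSeat : Prop := ∀ (seats : List Int), Dom_bestSeat seats → Spec_bestSeat seats (bestSeat seats)

-- ===== LEMMAS AND PROOFS =====

-- the chain of successive boundary positions visited by A's outer loop, starting after `left`
def bsChain (seats : List Int) (left : Nat) : List Nat :=
  if h : left < seats.length then
    bestSeatSkip seats (left + 1) :: bsChain seats (bestSeatSkip seats (left + 1))
  else []
termination_by seats.length - left
decreasing_by
  have := bestSeatSkip_ge seats (left + 1)
  omega

theorem bestSeatSkip_le (seats : List Int) (right : Nat) (h : right ≤ seats.length) :
    bestSeatSkip seats right ≤ seats.length := by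
  unfold bestSeatSkip
  split
  · split
    · exact bestSeatSkip_le seats (right + 1) (by omega)
    · omega
  · exact h
termination_by seats.length - right

theorem bestSeatSkip_zeros (seats : List Int) (right i : Nat)
    (h1 : right ≤ i) (h2 : i < bestSeatSkip seats right) : seats.getD i 0 = 0 := by
  unfold bestSeatSkip at h2
  split at h2
  · split at h2
    · rcases Nat.eq_or_lt_of_le h1 with rfl | hlt
      · assumption
      · exact bestSeatSkip_zeros seats (right + 1) i hlt h2
    · omega
  · omega
termination_by seats.length - right

theorem bestSeatSkip_stop (seats : List Int) (right : Nat)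
    (h : bestSeatSkip seats right < seats.length) : seats.getD (bestSeatSkip seats right) 0 ≠ 0 := by
  unfold bestSeatSkip at h ⊢
  split at h
  case isTrue hlt =>
    split at h
    case isTrue hz =>
      rw [dif_pos hlt, if_pos hz]
      exact bestSeatSkip_stop seats (right + 1) h
    case isFalse hz =>
      rw [dif_pos hlt, if_neg hz]
      exact hz
  case isFalse hlt => exact absurd h hlt
termination_by seats.length - right

theorem bsChain_nil (seats : List Int) (left : Nat) (h : seats.length ≤ left) :
    bsChain seats left = [] := by
  unfold bsChain
  rw [dif_neg (by omega)]

-- A's loop = fold of B's step over consecutive pairs of (left :: bsChain seats left)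
theorem bestSeatLoop_eq_fold (seats : List Int) (left : Nat) (res maxSpace : Int) :
    bestSeatLoop seats left res maxSpace =
      (List.foldl bestSeatStep (res, maxSpace)
        ((left :: bsChain seats left).zip (bsChain seats left))).1 := by
  unfold bestSeatLoop bsChain
  split
  · rename_i h
    set r := bestSeatSkip seats (left + 1) with hr
    rw [List.zip_cons_cons, List.foldl_cons]
    have key : bestSeatStep (res, maxSpace) (left, r) =
        if ((r : Int) - left - 1) > maxSpace then
          (PySem.Int.floordiv ((r : Int) + left) 2, (r : Int) - left - 1)
        else (res, maxSpace) := by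
      simp only [bestSeatStep]
      split
      · rw [Int.add_comm]
      · rfl
    rw [key]
    show (if ((r : Int) - left - 1) > maxSpace then
            bestSeatLoop seats r (PySem.Int.floordiv ((r : Int) + left) 2) ((r : Int) - left - 1)
          else bestSeatLoop seats r res maxSpace) = _
    split
    · exact bestSeatLoop_eq_fold seats r _ _
    · exact bestSeatLoop_eq_fold seats r _ _
  · simp
termination_by seats.length - left
decreasing_by
  all_goals
    have := bestSeatSkip_ge seats (left + 1)
    omega

-- the chain is exactly the boundary indices strictly after left, plus the sentinel n
theorem bsChain_eq_filter (seats : List Int) (left : Nat) (h : left < seats.length) :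
    bsChain seats left =
      (List.range' (left + 1) (seats.length - (left + 1))).filter
        (fun i => seats.getD i 0 ≠ 0) ++ [seats.length] := by
  unfold bsChain
  rw [dif_pos h]
  have hge : left + 1 ≤ bestSeatSkip seats (left + 1) := bestSeatSkip_ge seats (left + 1)
  have hle : bestSeatSkip seats (left + 1) ≤ seats.length :=
    bestSeatSkip_le seats (left + 1) (by omega)
  have hzeros : ∀ i, left + 1 ≤ i → i < bestSeatSkip seats (left + 1) → seats.getD i 0 = 0 :=
    fun i h1 h2 => bestSeatSkip_zeros seats (left + 1) i h1 h2
  have hstop := bestSeatSkip_stop seats (left + 1)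
  generalize hr : bestSeatSkip seats (left + 1) = r at hge hle hzeros hstop ⊢
  have e : seats.length - (left + 1) = (r - (left + 1)) + (seats.length - r) := by omega
  have hsplit : List.range' (left + 1) (seats.length - (left + 1)) =
      List.range' (left + 1) (r - (left + 1)) ++ List.range' r (seats.length - r) := by
    rw [e, ← List.range'_append]
    rw [Nat.one_mul, Nat.add_sub_cancel' hge]
  have hfilt0 : (List.range' (left + 1) (r - (left + 1))).filter
      (fun i => seats.getD i 0 ≠ 0) = [] := by
    apply List.filter_eq_nil_iff.mpr
    intro i hi
    rw [List.mem_range'] at hi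
    obtain ⟨j, hj1, hj2⟩ := hi
    simp only [decide_eq_true_eq, ne_eq, Decidable.not_not]
    exact hzeros _ (by omega) (by omega)
  rw [hsplit, List.filter_append, hfilt0, List.nil_append]
  by_cases hrn : r < seats.length
  · have e2 : seats.length - r = (seats.length - (r + 1)) + 1 := by omega
    rw [e2, List.range'_succ, List.filter_cons]
    rw [if_pos (by simpa using hstop hrn)]
    rw [bsChain_eq_filter seats r hrn]
    simp
  · have e0 : seats.length - r = 0 := by omega
    have hrn' : r = seats.length := by omega
    rw [e0, bsChain_nil seats r (by omega), hrn']
    simp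
termination_by seats.length - left
decreasing_by omega

-- ===== VERDICT (by name: the statement is the Claim_ definition above) =====
theorem bestSeat_spec : Claim_equal_bestSeat := by
  intro seats _
  unfold Spec_bestSeat bestSeat bestSeat_alt
  by_cases h : seats.length = 0
  · have hnil : seats = [] := List.length_eq_zero_iff.mp h
    subst hnil
    rw [bestSeatLoop]
    simp [bestSeatStep]
  · have h0 : 0 < seats.length := by omega
    rw [bestSeatLoop_eq_fold, bsChain_eq_filter seats 0 h0]
    simp only [List.tail_cons, Nat.zero_add]
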